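-- pv_equiv track=rewrite | github.com/cybergis/prasterblaster | tests/partition.py | survey_areas
-- ===== SOURCE A (Python) =====
-- def get_partition_area(partition):
--     width = partition[2] - partition[0] + 1
--     height = partition[3] - partition[1] + 1
--
--     return width * height
--
-- def survey_areas(partitions):
--     areas = {}
--
--     for p in partitions:
--         a = get_partition_area(p)
--         if a in areas:
--             areas[a] += 1
--         else:
--             areas[a] = 1
--
--     return areas
-- ===== SOURCE B (Python) =====
-- def survey_areas(partitions):
--     areas = [(p[2] - p[0] + 1) * (p[3] - p[1] + 1) for p in partitions]
--     result = {}
--     while areas: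
--         a = areas[0]
--         result[a] = areas.count(a)
--         areas = [x for x in areas if x != a]
--     return result
-- ===== Notes on version B (the rewrite author's own statement) =====
-- stated objective: alternative
-- what changed: Replaces A's per-element hash-accumulate loop (membership test + increment per partition) with a worklist algorithm: compute all areas once, then repeatedly take the first remaining area, record its total count, and filter all its occurrences out of the worklist, so the outer loop runs once per DISTINCT area and no running counter is maintained.
import Mathlib
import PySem

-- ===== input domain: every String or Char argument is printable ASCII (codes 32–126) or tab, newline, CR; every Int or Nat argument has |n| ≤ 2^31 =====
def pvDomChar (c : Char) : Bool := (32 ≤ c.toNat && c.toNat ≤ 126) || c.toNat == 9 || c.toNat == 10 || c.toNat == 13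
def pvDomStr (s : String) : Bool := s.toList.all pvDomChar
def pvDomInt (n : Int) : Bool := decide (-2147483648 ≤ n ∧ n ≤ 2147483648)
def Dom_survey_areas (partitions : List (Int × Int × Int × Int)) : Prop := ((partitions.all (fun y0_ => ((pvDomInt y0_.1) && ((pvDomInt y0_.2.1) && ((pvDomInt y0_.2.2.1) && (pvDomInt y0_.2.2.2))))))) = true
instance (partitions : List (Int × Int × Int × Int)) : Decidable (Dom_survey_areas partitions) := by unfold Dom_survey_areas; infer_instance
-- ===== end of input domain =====

-- B replaces A's per-element hash-accumulate loop by a worklist algorithm (take the first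
-- remaining area, record its total count, filter out all its occurrences); same result, no speed claim.

-- ===== PORT A =====
def get_partition_area (partition : Int × Int × Int × Int) : Int :=
  let width := partition.2.2.1 - partition.1 + 1
  let height := partition.2.2.2 - partition.2.1 + 1
  width * height

def survey_areas (partitions : List (Int × Int × Int × Int)) : List (Int × Int) :=
  (partitions.foldl (fun areas p =>
    let a := get_partition_area p
    if areas.contains a then areas.modify a 0 (· + 1) else areas.insert a 1)
    (PySem.Dict.empty : PySem.Dict Int Int)).items

-- ===== PORT B =====
-- the while loop of Source B: state = (remaining areas worklist, result dict)
def pvGoB : List Int → PySem.Dict Int Int → PySem.Dict Int Int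
  | [], result => result
  | a :: rest, result =>
    pvGoB ((a :: rest).filter (fun x => decide (x ≠ a)))
      (result.insert a (((a :: rest).count a : Nat) : Int))
termination_by as _ => as.length
decreasing_by
  simp only [List.filter_cons, decide_not, List.length_cons]
  exact Nat.lt_succ_of_le (List.length_filter_le _ _)

def survey_areas_alt (partitions : List (Int × Int × Int × Int)) : List (Int × Int) :=
  let areas := partitions.map (fun p => (p.2.2.1 - p.1 + 1) * (p.2.2.2 - p.2.1 + 1))
  (pvGoB areas (PySem.Dict.empty : PySem.Dict Int Int)).items

-- ===== PRECONDITION & SPEC =====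
def Spec_survey_areas (partitions : List (Int × Int × Int × Int)) (out : List (Int × Int)) : Prop := out = survey_areas_alt partitions
instance (partitions : List (Int × Int × Int × Int)) (out : List (Int × Int)) : Decidable (Spec_survey_areas partitions out) := by unfold Spec_survey_areas; infer_instance

-- ===== CLAIM (what is proved, stated in full; the proofs are below) =====
def Claim_equal_survey_areas : Prop := ∀ (partitions : List (Int × Int × Int × Int)), Dom_survey_areas partitions → Spec_survey_areas partitions (survey_areas partitions)

-- ===== LEMMAS AND PROOFS =====

-- A's branching step is exactly Counter's modify step.
theorem stepA_eq_modify (d : PySem.Dict Int Int) (a : Int) :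
    (if d.contains a then d.modify a 0 (· + 1) else d.insert a 1) = d.modify a 0 (· + 1) := by
  by_cases h : d.contains a = true
  · simp [h]
  · have h0 : d.getD a 0 = 0 :=
      PySem.Dict.getD_of_not_contains d 0 (by simpa using h)
    simp [h, PySem.Dict.modify, h0]

-- Set.update over a list not containing x commutes with a cons'd accumulator head.
theorem update_cons_of_not_mem (l : List Int) (x : Int) (s : PySem.Set Int)
    (hx : x ∉ l) : PySem.Set.update (x :: s) l = x :: PySem.Set.update s l := by
  induction l generalizing s with
  | nil => rfl
  | cons y t ih =>
    have hyx : x ≠ y := fun h => hx (h ▸ List.mem_cons_self)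
    have hxt : x ∉ t := fun h => hx (List.mem_cons_of_mem _ h)
    have hyx' : ¬ y = x := fun h => hyx h.symm
    have hadd : PySem.Set.add (x :: s) y = x :: PySem.Set.add s y := by
      by_cases hm : y ∈ s <;> simp [PySem.Set.add, PySem.Set.contains, hyx', hm]
    simp only [PySem.Set.update, List.foldl_cons] at *
    rw [hadd, ih _ hxt]

-- Adding keeps existing members.
theorem mem_add_of_mem (s : PySem.Set Int) (y a : Int) (ha : a ∈ s) : a ∈ PySem.Set.add s y := by
  by_cases hc : y ∈ s <;> simp [PySem.Set.add, PySem.Set.contains, hc, ha]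

-- Filtering out an element already in the accumulator does not change Set.update.
theorem update_filter_of_mem (l : List Int) (a : Int) (s : PySem.Set Int)
    (ha : a ∈ s) : PySem.Set.update s (l.filter (fun x => decide (x ≠ a))) = PySem.Set.update s l := by
  induction l generalizing s with
  | nil => rfl
  | cons y t ih =>
    by_cases hy : y = a
    · subst hy
      have hfc : (y :: t).filter (fun x => decide (x ≠ y)) = t.filter (fun x => decide (x ≠ y)) := by
        simp
      rw [hfc, ih s ha]
      have hadd : PySem.Set.add s y = s := by
        simp [PySem.Set.add, PySem.Set.contains, ha]
      simp [PySem.Set.update, hadd]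
    · have hfc : (y :: t).filter (fun x => decide (x ≠ a)) = y :: t.filter (fun x => decide (x ≠ a)) := by
        simp [hy]
      rw [hfc]
      simp only [PySem.Set.update, List.foldl_cons]
      exact ih (PySem.Set.add s y) (mem_add_of_mem s y a ha)

-- First-occurrence dedup peels its head: set-of-list of a::t is a followed by the dedup of t without a.
theorem ofList_cons_filter (a : Int) (t : List Int) :
    PySem.Set.ofList (a :: t) = a :: PySem.Set.ofList (t.filter (fun x => decide (x ≠ a))) := by
  have h1 : PySem.Set.ofList (a :: t) = PySem.Set.update [a] t := by
    simp [PySem.Set.ofList_eq_foldl, PySem.Set.update, PySem.Set.add, PySem.Set.contains]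
  have h2 : PySem.Set.update [a] t = PySem.Set.update [a] (t.filter (fun x => decide (x ≠ a))) :=
    (update_filter_of_mem t a [a] (by simp)).symm
  have h3 : a ∉ t.filter (fun x => decide (x ≠ a)) := by
    intro h; simpa using (List.of_mem_filter h)
  rw [h1, h2, update_cons_of_not_mem _ _ _ h3]
  rfl

-- The worklist loop appends one (key, total count) pair per distinct area, in first-occurrence order.
theorem pvGoB_items (n : Nat) : ∀ (as : List Int) (d : PySem.Dict Int Int),
    as.length ≤ n → (∀ k ∈ as, d.contains k = false) →
    (pvGoB as d).items = d.items ++ (PySem.Set.ofList as).map (fun k => (k, (as.count k : Int))) := by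
  induction n with
  | zero =>
    intro as d hlen _
    have : as = [] := List.eq_nil_of_length_eq_zero (Nat.le_zero.mp hlen)
    subst this; simp [pvGoB]
  | succ n ih =>
    intro as d hlen hfresh
    match as with
    | [] => simp [pvGoB]
    | a :: t =>
      have hfilt : (a :: t).filter (fun x => decide (x ≠ a)) = t.filter (fun x => decide (x ≠ a)) := by
        simp
      rw [pvGoB, hfilt]
      set tf := t.filter (fun x => decide (x ≠ a)) with htf
      have hlen' : tf.length ≤ n := by
        rw [htf]
        have := List.length_filter_le (fun x => decide (x ≠ a)) t
        simp only [List.length_cons] at hlen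
        omega
      have hfresh' : ∀ k ∈ tf, (d.insert a (((a :: t).count a : Nat) : Int)).contains k = false := by
        intro k hk
        have hkt : k ∈ t := List.mem_of_mem_filter hk
        have hka : k ≠ a := by simpa using (List.of_mem_filter hk)
        rw [PySem.Dict.contains_insert]
        simp [hka, hfresh k (List.mem_cons_of_mem _ hkt)]
      rw [ih tf _ hlen' hfresh']
      have hnotc : d.contains a = false := hfresh a List.mem_cons_self
      rw [PySem.Dict.items_insert_of_not_contains _ _ hnotc]
      rw [ofList_cons_filter a t]
      simp only [List.map_cons, List.append_assoc, List.cons_append, List.nil_append]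
      rw [← htf]
      congr 1
      congr 1
      apply List.map_congr_left
      intro k hk
      have hktf : k ∈ tf := (PySem.Set.mem_ofList tf k).mp hk
      have hka : k ≠ a := by simpa using (List.of_mem_filter hktf)
      have hcount : List.count k tf = List.count k (a :: t) := by
        rw [htf, List.count_filter (by simp [hka]), List.count_cons]
        simp [Ne.symm hka]
      simp [hcount]

theorem survey_eq (partitions : List (Int × Int × Int × Int)) :
    survey_areas partitions = survey_areas_alt partitions := by
  have hA : (partitions.foldl (fun areas p =>
      let a := get_partition_area p
      if areas.contains a then areas.modify a 0 (· + 1) else areas.insert a 1)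
      (PySem.Dict.empty : PySem.Dict Int Int))
      = PySem.Dict.counter (partitions.map get_partition_area) := by
    rw [PySem.Dict.counter_eq_foldl, List.foldl_map]
    exact (PySem.List.foldl_congr_mem _ _ _ _
      (fun acc x _ => stepA_eq_modify acc (get_partition_area x)))
  have hmap : partitions.map (fun p => (p.2.2.1 - p.1 + 1) * (p.2.2.2 - p.2.1 + 1))
      = partitions.map get_partition_area := rfl
  unfold survey_areas survey_areas_alt
  rw [hA, PySem.Dict.items_counter, hmap]
  set as := partitions.map get_partition_area with has
  rw [pvGoB_items as.length as _ le_rfl (by intro k _; simp [PySem.Dict.contains_empty])]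
  simp [PySem.Dict.empty]

-- ===== VERDICT (by name: the statement is the Claim_ definition above) =====
theorem survey_areas_spec : Claim_equal_survey_areas := by
  intro partitions _
  unfold Spec_survey_areas
  exact survey_eq partitions
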